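-- pv_equiv track=rewrite | github.com/itsandyking/Lookout | lookout/feedback/analyzer.py | _common_type
-- ===== SOURCE A (Python) =====
-- def _common_value(items: list[str]) -> str | None:
--     """Return the value if all items are identical, else None."""
--     unique = set(items)
--     if len(unique) == 1:
--         return unique.pop()
--     return None
--
-- def _common_type(entries: list[dict]) -> str | None:
--     """Detect a shared product type from type_words across entries."""
--     types = []
--     for e in entries:
--         tw = e.get("type_words")
--         if isinstance(tw, list) and tw:
--             types.append(" ".join(tw))
--         elif isinstance(tw, str) and tw:
--             types.append(tw)
--     if not types:
--         return None
--     return _common_value(types)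
-- ===== SOURCE B (Python) =====
-- def _common_type(entries: list[dict]) -> str | None:
--     """Detect a shared product type from type_words across entries.
--
--     Single pass: no intermediate list, no set. The first valid normalized
--     type becomes the candidate; any later valid type that differs means
--     there is no shared type. Valid types are never empty strings, so None
--     doubles as the 'nothing seen yet' sentinel.
--     """
--     common = None
--     for e in entries:
--         tw = e.get("type_words")
--         if isinstance(tw, list) and tw:
--             t = " ".join(tw)
--         elif isinstance(tw, str) and tw:
--             t = tw
--         else:
--             continue
--         if common is None:
--             common = t
--         elif t != common:
--             return None
--     return common
-- ===== Notes on version B (the rewrite author's own statement) =====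
-- stated objective: simpler
-- what changed: Replaced A's collect-all-then-set-cardinality strategy (build a list of normalized types, put it in a set, test len==1) by a single streaming pass that keeps one candidate string and returns None immediately on the first mismatch, with no intermediate list or set.
import Mathlib
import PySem

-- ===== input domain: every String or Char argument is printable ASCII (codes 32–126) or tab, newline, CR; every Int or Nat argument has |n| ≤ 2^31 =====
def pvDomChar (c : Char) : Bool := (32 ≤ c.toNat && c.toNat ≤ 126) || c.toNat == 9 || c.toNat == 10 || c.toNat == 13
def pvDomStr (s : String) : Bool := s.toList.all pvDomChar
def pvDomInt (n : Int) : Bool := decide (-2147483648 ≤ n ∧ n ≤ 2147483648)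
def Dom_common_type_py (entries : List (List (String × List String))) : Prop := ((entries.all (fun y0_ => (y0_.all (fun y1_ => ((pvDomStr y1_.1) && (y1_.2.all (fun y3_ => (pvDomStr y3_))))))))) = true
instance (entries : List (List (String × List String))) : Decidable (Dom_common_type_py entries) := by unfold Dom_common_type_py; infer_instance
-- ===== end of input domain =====

-- B replaces A's collect-list-then-set-cardinality check by a single streaming pass
-- keeping one candidate string (objective: simpler).
-- Under the type convention each entry maps "type_words" to a list of strings, so
-- A's `isinstance(tw, str)` branch is unreachable and is not ported.

-- ===== PORT A =====
-- _common_value: unique = set(items); if len(unique) == 1: return unique.pop(); return None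
-- (set.pop on a one-element set deterministically yields that element, ported as head?)
def common_value_py (items : List String) : Option String :=
  let unique : PySem.Set String := PySem.Set.ofList items
  if PySem.Set.len unique = 1 then unique.head? else none

def common_type_py (entries : List (List (String × List String))) : Option String :=
  let types := entries.foldl (fun types e =>
    match (PySem.Dict.mk e).get? "type_words" with
    | some tw => if tw ≠ [] then types ++ [PySem.Str.join " " tw] else types
    | none => types) []
  if types = [] then none
  else common_value_py types

-- ===== PORT B =====
-- the loop of Source B: `common` is the running candidate (none = nothing seen yet);
-- a differing valid type returns none immediately.
def common_type_alt_go : List (List (String × List String)) → Option String → Option String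
  | [], common => common
  | e :: rest, common =>
    match (PySem.Dict.mk e).get? "type_words" with
    | some tw =>
      if tw ≠ [] then
        let t := PySem.Str.join " " tw
        match common with
        | none => common_type_alt_go rest (some t)
        | some c => if t ≠ c then none else common_type_alt_go rest (some c)
      else common_type_alt_go rest common
    | none => common_type_alt_go rest common

def common_type_py_alt (entries : List (List (String × List String))) : Option String :=
  common_type_alt_go entries none

-- ===== PRECONDITION & SPEC =====
def Spec_common_type_py (entries : List (List (String × List String))) (out : Option String) : Prop := out = common_type_py_alt entries
instance (entries : List (List (String × List String))) (out : Option String) : Decidable (Spec_common_type_py entries out) := by unfold Spec_common_type_py; infer_instance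

-- ===== CLAIM (what is proved, stated in full; the proofs are below) =====
def Claim_equal_common_type_py : Prop := ∀ (entries : List (List (String × List String))), Dom_common_type_py entries → Spec_common_type_py entries (common_type_py entries)

-- ===== LEMMAS AND PROOFS =====

-- normalized type of one entry (proof-only helper)
def pvNorm (e : List (String × List String)) : Option String :=
  match (PySem.Dict.mk e).get? "type_words" with
  | some tw => if tw ≠ [] then some (PySem.Str.join " " tw) else none
  | none => none

theorem foldl_types_eq_filterMap (entries : List (List (String × List String)))
    (acc : List String) :
    entries.foldl (fun types e =>
      match (PySem.Dict.mk e).get? "type_words" with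
      | some tw => if tw ≠ [] then types ++ [PySem.Str.join " " tw] else types
      | none => types) acc = acc ++ entries.filterMap pvNorm := by
  induction entries generalizing acc with
  | nil => simp
  | cons e rest ih =>
    cases h : (PySem.Dict.mk e).get? "type_words" with
    | none =>
      have hn : pvNorm e = none := by simp [pvNorm, h]
      simp only [List.foldl_cons, h, List.filterMap_cons, hn]
      exact ih acc
    | some tw =>
      by_cases htw : tw = []
      · have hn : pvNorm e = none := by simp [pvNorm, h, htw]
        simp only [List.foldl_cons, h, htw, List.filterMap_cons, hn, ne_eq,
          not_true_eq_false, if_false]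
        exact ih acc
      · have hn : pvNorm e = some (PySem.Str.join " " tw) := by simp [pvNorm, h, htw]
        simp only [List.foldl_cons, h, List.filterMap_cons, hn, htw, ne_eq,
          not_false_eq_true, if_true]
        rw [ih (acc ++ [PySem.Str.join " " tw])]
        simp

theorem length_le_foldl_add (l : List String) (s : PySem.Set String) :
    s.length ≤ (l.foldl PySem.Set.add s).length := by
  induction l generalizing s with
  | nil => simp
  | cons x rest ih =>
    refine le_trans ?_ (ih (PySem.Set.add s x))
    simp only [PySem.Set.add]
    split <;> simp

theorem foldl_add_all_eq (t : String) (rest : List String)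
    (h : ∀ x ∈ rest, x = t) : rest.foldl PySem.Set.add [t] = [t] := by
  induction rest with
  | nil => rfl
  | cons y rs ih =>
    have hy : y = t := h y (by simp)
    have : PySem.Set.add [t] y = [t] := by
      simp [PySem.Set.add, hy, PySem.Set.contains]
    simp only [List.foldl_cons, this]
    exact ih (fun x hx => h x (by simp [hx]))

theorem foldl_add_two_le (t : String) (rest : List String)
    (x : String) (hx : x ∈ rest) (hxt : x ≠ t) :
    2 ≤ (rest.foldl PySem.Set.add [t]).length := by
  induction rest with
  | nil => simp at hx
  | cons y rs ih =>
    by_cases hy : y = t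
    · subst hy
      have : PySem.Set.add [y] y = [y] := by simp [PySem.Set.add, PySem.Set.contains]
      simp only [List.foldl_cons, this]
      rcases List.mem_cons.mp hx with h | h
      · exact absurd h hxt
      · exact ih h
    · have : PySem.Set.add [t] y = [t, y] := by
        simp [PySem.Set.add, PySem.Set.contains, hy]
      simp only [List.foldl_cons, this]
      exact le_trans (by simp) (length_le_foldl_add rs [t, y])

-- A's value on a nonempty normalized-type list
theorem common_value_cons (t : String) (rest : List String) :
    common_value_py (t :: rest) =
      (if ∀ x ∈ rest, x = t then some t else none) := by
  unfold common_value_py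
  have hofl : PySem.Set.ofList (t :: rest) = rest.foldl PySem.Set.add [t] := by
    simp [PySem.Set.ofList_eq_foldl]
  by_cases h : ∀ x ∈ rest, x = t
  · simp [hofl, foldl_add_all_eq t rest h, PySem.Set.len]
    exact h
  · push_neg at h
    obtain ⟨x, hx, hxt⟩ := h
    have h2 := foldl_add_two_le t rest x hx hxt
    have hne : ¬ (∀ x ∈ rest, x = t) := by
      intro hall; exact hxt (hall x hx)
    rw [hofl]
    simp only [PySem.Set.len]
    rw [if_neg (by omega), if_neg hne]

-- B's loop, state = some candidate
theorem alt_go_some (entries : List (List (String × List String))) (c : String) :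
    common_type_alt_go entries (some c) =
      (if ∀ x ∈ entries.filterMap pvNorm, x = c then some c else none) := by
  induction entries with
  | nil => simp [common_type_alt_go]
  | cons e rest ih =>
    cases h : (PySem.Dict.mk e).get? "type_words" with
    | none =>
      have hn : pvNorm e = none := by simp [pvNorm, h]
      simp only [common_type_alt_go, h, List.filterMap_cons, hn]
      exact ih
    | some tw =>
      by_cases htw : tw = []
      · have hn : pvNorm e = none := by simp [pvNorm, h, htw]
        simp only [common_type_alt_go, h, htw, List.filterMap_cons, hn]
        simpa using ih
      · have hn : pvNorm e = some (PySem.Str.join " " tw) := by simp [pvNorm, h, htw]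
        simp only [common_type_alt_go, h, List.filterMap_cons, hn, htw, ne_eq,
          not_false_eq_true, if_true]
        by_cases hc : PySem.Str.join " " tw = c
        · subst hc
          simp only [ih, List.forall_mem_cons, true_and, not_true_eq_false, if_false]
        · have hne : ¬ (∀ x ∈ PySem.Str.join " " tw :: List.filterMap pvNorm rest, x = c) :=
            fun hall => hc (hall (PySem.Str.join " " tw) List.mem_cons_self)
          simp only [hc, not_false_eq_true, if_true, if_neg hne]

-- B's loop, state = nothing seen yet
theorem alt_go_none (entries : List (List (String × List String))) :
    common_type_alt_go entries none =
      (match entries.filterMap pvNorm with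
       | [] => none
       | t :: rest => if ∀ x ∈ rest, x = t then some t else none) := by
  induction entries with
  | nil => simp [common_type_alt_go]
  | cons e rest ih =>
    cases h : (PySem.Dict.mk e).get? "type_words" with
    | none =>
      have hn : pvNorm e = none := by simp [pvNorm, h]
      simp only [common_type_alt_go, h, List.filterMap_cons, hn]
      exact ih
    | some tw =>
      by_cases htw : tw = []
      · have hn : pvNorm e = none := by simp [pvNorm, h, htw]
        simp only [common_type_alt_go, h, htw, List.filterMap_cons, hn]
        simpa using ih
      · have hn : pvNorm e = some (PySem.Str.join " " tw) := by simp [pvNorm, h, htw]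
        simp only [common_type_alt_go, h, List.filterMap_cons, hn, htw, ne_eq,
          not_false_eq_true, if_true]
        exact alt_go_some rest (PySem.Str.join " " tw)

-- ===== VERDICT (by name: the statement is the Claim_ definition above) =====
theorem common_type_py_spec : Claim_equal_common_type_py := by
  intro entries _
  unfold Spec_common_type_py common_type_py common_type_py_alt
  rw [foldl_types_eq_filterMap, List.nil_append, alt_go_none]
  cases hts : entries.filterMap pvNorm with
  | nil => simp
  | cons t rest =>
    simp only [if_neg (List.cons_ne_nil t rest)]
    exact common_value_cons t rest
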